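-- pv_equiv track=rewrite | github.com/Trunghieuu0910/DATN | src/utils/list_dict_utils.py | merge_logs
-- ===== SOURCE A (Python) =====
-- import copy
--
-- def merge_logs(logs_dict: dict, default_value=None):
--     keys = set()
--     for logs in logs_dict.values():
--         keys.update(logs.keys())
--     keys = sorted(list(keys))
--
--     data = {}
--     values = {name: default_value for name in logs_dict}
--     for key in keys:
--         for name, logs in logs_dict.items():
--             values[name] = logs.get(key, values[name])
--         data[key] = copy.deepcopy(values)
--
--     return data
-- ===== SOURCE B (Python) =====
-- def merge_logs(logs_dict: dict, default_value=None):
--     # Two-pass shape: first forward-fill a per-name column over the sorted key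
--     # union, then assemble one snapshot dict per key from the columns.
--     keys = sorted({k for logs in logs_dict.values() for k in logs})
--     filled = {}
--     for name, logs in logs_dict.items():
--         cur = default_value
--         col = []
--         for key in keys:
--             cur = logs.get(key, cur)
--             col.append(cur)
--         filled[name] = col
--     return {key: {name: filled[name][i] for name in logs_dict}
--             for i, key in enumerate(keys)}
-- ===== Notes on version B (the rewrite author's own statement) =====
-- stated objective: alternative
-- what changed: A interleaves one running values-dict that is mutated and deep-copied once per sorted key; B first builds a per-name forward-filled column over the sorted key union and then assembles each key's snapshot by indexing the columns (index-build-then-assemble, no running dict, no deepcopy).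
import Mathlib
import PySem

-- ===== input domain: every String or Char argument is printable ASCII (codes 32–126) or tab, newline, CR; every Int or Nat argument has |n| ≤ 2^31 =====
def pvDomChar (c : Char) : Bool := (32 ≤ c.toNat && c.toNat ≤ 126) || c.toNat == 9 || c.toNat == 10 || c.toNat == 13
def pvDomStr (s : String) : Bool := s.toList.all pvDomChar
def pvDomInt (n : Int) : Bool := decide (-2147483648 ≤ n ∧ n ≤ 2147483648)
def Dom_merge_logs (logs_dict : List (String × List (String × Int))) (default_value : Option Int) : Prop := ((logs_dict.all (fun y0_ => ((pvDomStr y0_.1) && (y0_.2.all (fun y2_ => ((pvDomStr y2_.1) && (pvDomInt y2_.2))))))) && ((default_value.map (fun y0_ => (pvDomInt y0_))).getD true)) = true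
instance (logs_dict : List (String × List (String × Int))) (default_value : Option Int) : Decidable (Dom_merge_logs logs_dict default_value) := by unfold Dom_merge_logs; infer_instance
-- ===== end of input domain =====

-- B replaces A's single interleaved running-values pass by an index-build-then-assemble
-- two-pass shape (per-name forward-filled columns, then one snapshot per key); same output.
-- The dict-typed arguments are read as Python dicts: both ports normalise the association
-- lists through PySem.Dict.ofList (last duplicate wins, first position kept), exactly as
-- Python's dict construction does.

-- shared primitive: Python's logs.get(key, cur) where the stored values are ints
def pyLogGet (logs : PySem.Dict String Int) (key : String) (cur : Option Int) : Option Int :=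
  match logs.get? key with
  | some w => some w
  | none => cur

-- ===== PORT A =====
def merge_logs (logs_dict : List (String × List (String × Int))) (default_value : Option Int) : List (String × List (String × Option Int)) :=
  let ld : PySem.Dict String (PySem.Dict String Int) :=
    PySem.Dict.ofList (logs_dict.map (fun p => (p.1, PySem.Dict.ofList p.2)))
  -- keys = set(); for logs in logs_dict.values(): keys.update(logs.keys())
  let keySet : PySem.Set String :=
    ld.values.foldl (fun s logs => PySem.Set.update s logs.keys) PySem.Set.empty
  -- keys = sorted(list(keys))
  let keys := PySem.List.sorted keySet (fun x => x) false
  -- values = {name: default_value for name in logs_dict}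
  let values0 : PySem.Dict String (Option Int) :=
    ld.keys.foldl (fun d name => d.insert name default_value) PySem.Dict.empty
  -- data = {}; for key in keys: (inner loop); data[key] = copy.deepcopy(values)
  (keys.foldl
    (fun (st : PySem.Dict String (List (String × Option Int)) × PySem.Dict String (Option Int)) key =>
      -- for name, logs in logs_dict.items(): values[name] = logs.get(key, values[name])
      -- (values[name] always exists; the 'none' default of getD is never used)
      let values := ld.items.foldl
        (fun v p => v.insert p.1 (pyLogGet p.2 key (v.getD p.1 none))) st.2
      (st.1.insert key values.items, values))
    (PySem.Dict.empty, values0)).1.items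

-- ===== PORT B =====
def merge_logs_alt (logs_dict : List (String × List (String × Int))) (default_value : Option Int) : List (String × List (String × Option Int)) :=
  let ld : PySem.Dict String (PySem.Dict String Int) :=
    PySem.Dict.ofList (logs_dict.map (fun p => (p.1, PySem.Dict.ofList p.2)))
  -- keys = sorted({k for logs in logs_dict.values() for k in logs})
  let keys := PySem.List.sorted
    (PySem.Set.ofList (ld.values.flatMap (fun logs => logs.keys))) (fun x => x) false
  -- for name, logs in logs_dict.items(): cur = default_value; col = []; (scan); filled[name] = col
  let filled : PySem.Dict String (List (Option Int)) :=
    ld.items.foldl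
      (fun f p =>
        let col := keys.foldl
          (fun (st : Option Int × List (Option Int)) key =>
            let cur := pyLogGet p.2 key st.1
            (cur, st.2 ++ [cur]))
          (default_value, [])
        f.insert p.1 col.2)
      PySem.Dict.empty
  -- {key: {name: filled[name][i] for name in logs_dict} for i, key in enumerate(keys)}
  ((PySem.List.enumerate keys).foldl
    (fun d ik =>
      d.insert ik.2
        ((ld.items.foldl
          (fun s p => s.insert p.1 (PySem.List.pyGetD (filled.getD p.1 []) ik.1 none))
          PySem.Dict.empty).items))
    PySem.Dict.empty).items

-- ===== PRECONDITION & SPEC =====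
def Spec_merge_logs (logs_dict : List (String × List (String × Int))) (default_value : Option Int) (out : List (String × List (String × Option Int))) : Prop := out = merge_logs_alt logs_dict default_value
instance (logs_dict : List (String × List (String × Int))) (default_value : Option Int) (out : List (String × List (String × Option Int))) : Decidable (Spec_merge_logs logs_dict default_value out) := by unfold Spec_merge_logs; infer_instance

-- ===== CLAIM (what is proved, stated in full; the proofs are below) =====
def Claim_equal_merge_logs : Prop := ∀ (logs_dict : List (String × List (String × Int))) (default_value : Option Int), Dom_merge_logs logs_dict default_value → Spec_merge_logs logs_dict default_value (merge_logs logs_dict default_value)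

-- ===== LEMMAS AND PROOFS =====

-- forward-filled value of one log over a list of keys, starting from the default
def ffill (dv : Option Int) (logs : PySem.Dict String Int) (ks : List String) : Option Int :=
  ks.foldl (fun cur k => pyLogGet logs k cur) dv

-- the snapshot A stores for the key closing prefix 'pre'
def snap (dv : Option Int) (L : List (String × PySem.Dict String Int)) (pre : List String) :
    List (String × Option Int) :=
  L.map (fun p => (p.1, ffill dv p.2 pre))

-- all snapshots for the remaining keys, given the prefix already processed
def snaps (dv : Option Int) (L : List (String × PySem.Dict String Int)) :
    List String → List String → List (String × List (String × Option Int))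
  | _, [] => []
  | pre, k :: t => (k, snap dv L (pre ++ [k])) :: snaps dv L (pre ++ [k]) t

-- B's forward-filled column for one log
def colList (logs : PySem.Dict String Int) : Option Int → List String → List (Option Int)
  | _, [] => []
  | a, k :: t => pyLogGet logs k a :: colList logs (pyLogGet logs k a) t

theorem ffill_append_singleton (dv : Option Int) (logs : PySem.Dict String Int)
    (pre : List String) (k : String) :
    ffill dv logs (pre ++ [k]) = pyLogGet logs k (ffill dv logs pre) := by
  simp [ffill, List.foldl_append]

theorem foldl_set_update_flatMap {α : Type} (g : α → List String) :
    ∀ (l : List α) (s : PySem.Set String),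
      l.foldl (fun s x => PySem.Set.update s (g x)) s = PySem.Set.update s (l.flatMap g)
  | [], s => by simp [PySem.Set.update]
  | x :: t, s => by
    rw [List.flatMap_cons, PySem.Set.update_append]
    exact foldl_set_update_flatMap g t _



theorem inner_fold_items (key : String) (G : String × PySem.Dict String Int → Option Int) :
    ∀ (l : List (String × PySem.Dict String Int)) (done : List (String × Option Int))
      (v : PySem.Dict String (Option Int)),
      v.items = done ++ l.map (fun p => (p.1, G p)) →
      v.keys.Nodup →
      (l.foldl (fun v p => v.insert p.1 (pyLogGet p.2 key (v.getD p.1 none))) v).items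
        = done ++ l.map (fun p => (p.1, pyLogGet p.2 key (G p)))
  | [], done, v, hitems, hnd => by simpa using hitems
  | p :: t, done, v, hitems, hnd => by
    have hmem : (p.1, G p) ∈ v.items := by rw [hitems]; simp
    have hget : v.getD p.1 none = G p := PySem.Dict.getD_of_mem_items v hmem hnd none
    have hcont : v.contains p.1 = true :=
      (PySem.Dict.contains_iff_mem_keys v p.1).2 (PySem.Dict.mem_keys_of_mem_items v hmem)
    have hnd2 : (done.map Prod.fst ++ p.1 :: t.map (fun q => q.1)).Nodup := by
      have : v.keys = (done ++ (p.1, G p) :: t.map (fun q => (q.1, G q))).map Prod.fst := by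
        simp only [PySem.Dict.keys, hitems]; simp
      rw [this] at hnd
      simpa [List.map_append, List.map_map, Function.comp] using hnd
    have hdone : ∀ q ∈ done, q.1 ≠ p.1 := by
      intro q hq
      exact (List.nodup_append.mp hnd2).2.2 q.1 (List.mem_map_of_mem hq) p.1 (by simp)
    have ht : ∀ q ∈ t, q.1 ≠ p.1 := by
      intro q hq hq1
      have := (List.nodup_cons.mp (List.nodup_append.mp hnd2).2.1).1
      exact this (hq1 ▸ List.mem_map_of_mem hq)
    have hitems' : (v.insert p.1 (pyLogGet p.2 key (v.getD p.1 none))).items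
        = (done ++ [(p.1, pyLogGet p.2 key (G p))]) ++ t.map (fun q => (q.1, G q)) := by
      have e1 : done.map (fun q => if (q.1 == p.1) = true then (p.1, pyLogGet p.2 key (G p)) else q) = done := by
        have : done.map (fun q => if (q.1 == p.1) = true then (p.1, pyLogGet p.2 key (G p)) else q)
            = done.map id := List.map_congr_left (fun q hq => by simp [hdone q hq])
        simpa using this
      have e2 : (t.map (fun q => (q.1, G q))).map
            (fun q => if (q.1 == p.1) = true then (p.1, pyLogGet p.2 key (G p)) else q)
          = t.map (fun q => (q.1, G q)) := by
        have : (t.map (fun q => (q.1, G q))).map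
              (fun q => if (q.1 == p.1) = true then (p.1, pyLogGet p.2 key (G p)) else q)
            = (t.map (fun q => (q.1, G q))).map id := by
          refine List.map_congr_left (fun q hq => ?_)
          obtain ⟨r, hr, rfl⟩ := List.mem_map.mp hq
          simp [ht r hr]
        simpa using this
      rw [PySem.Dict.items_insert_of_contains v _ hcont, hitems, hget, List.map_append]
      simp only [List.map_cons]
      rw [e1, e2]
      simp
    have hnd' : (v.insert p.1 (pyLogGet p.2 key (v.getD p.1 none))).keys.Nodup := by
      have : (v.insert p.1 (pyLogGet p.2 key (v.getD p.1 none))).keys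
          = done.map Prod.fst ++ p.1 :: t.map (fun q => q.1) := by
        simp only [PySem.Dict.keys, hitems']
        simp [List.map_append, List.map_map, Function.comp]
      rw [this]; exact hnd2
    rw [List.foldl_cons]
    rw [inner_fold_items key G t (done ++ [(p.1, pyLogGet p.2 key (G p))]) _ hitems' hnd']
    simp

theorem outer_fold (dv : Option Int) (L : List (String × PySem.Dict String Int))
    (hN : (L.map Prod.fst).Nodup) :
    ∀ (rem pre : List String) (data : PySem.Dict String (List (String × Option Int)))
      (v : PySem.Dict String (Option Int)),
      v.items = snap dv L pre →
      rem.Nodup →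
      (∀ k ∈ rem, data.contains k = false) →
      ((rem.foldl
          (fun (st : PySem.Dict String (List (String × Option Int)) × PySem.Dict String (Option Int)) key =>
            (st.1.insert key (L.foldl (fun v p => v.insert p.1 (pyLogGet p.2 key (v.getD p.1 none))) st.2).items,
             L.foldl (fun v p => v.insert p.1 (pyLogGet p.2 key (v.getD p.1 none))) st.2))
          (data, v)).1).items
        = data.items ++ snaps dv L pre rem
  | [], pre, data, v, hitems, hndrem, hfresh => by simp [snaps]
  | key :: t, pre, data, v, hitems, hndrem, hfresh => by
    have hvk : v.keys.Nodup := by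
      have : v.keys = L.map (fun p => p.1) := by
        simp only [PySem.Dict.keys, hitems, snap]; simp [List.map_map, Function.comp]
      rw [this]; simpa using hN
    have hv' : (L.foldl (fun v p => v.insert p.1 (pyLogGet p.2 key (v.getD p.1 none))) v).items
        = snap dv L (pre ++ [key]) := by
      rw [inner_fold_items key (fun p => ffill dv p.2 pre) L [] v (by simpa [snap] using hitems) hvk]
      simp [snap, ffill_append_singleton]
    rw [List.foldl_cons]
    show ((t.foldl _ (data.insert key (L.foldl (fun v p => v.insert p.1 (pyLogGet p.2 key (v.getD p.1 none))) v).items,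
        L.foldl (fun v p => v.insert p.1 (pyLogGet p.2 key (v.getD p.1 none))) v)).1).items = _
    rw [hv']
    rw [outer_fold dv L hN t (pre ++ [key]) _ _ hv' (List.nodup_cons.mp hndrem).2
        (by
          intro k hk
          rw [PySem.Dict.contains_insert]
          have hne : k ≠ key := by
            intro h; exact (List.nodup_cons.mp hndrem).1 (h ▸ hk)
          simp [hne, hfresh k (List.mem_cons_of_mem _ hk)])]
    rw [PySem.Dict.items_insert_of_not_contains data _ (hfresh key (by simp))]
    simp [snaps]

theorem scan_eq (logs : PySem.Dict String Int) :
    ∀ (ks : List String) (a : Option Int) (acc : List (Option Int)),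
      ks.foldl (fun (st : Option Int × List (Option Int)) k =>
          (pyLogGet logs k st.1, st.2 ++ [pyLogGet logs k st.1])) (a, acc)
        = (ks.foldl (fun c k => pyLogGet logs k c) a, acc ++ colList logs a ks)
  | [], a, acc => by simp [colList]
  | k :: t, a, acc => by
    rw [List.foldl_cons, List.foldl_cons, scan_eq logs t _ _]
    simp [colList]

theorem colList_getD (logs : PySem.Dict String Int) :
    ∀ (ks : List String) (a : Option Int) (i : Nat), i < ks.length →
      (colList logs a ks).getD i none
        = (ks.take (i + 1)).foldl (fun c k => pyLogGet logs k c) a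
  | [], a, i, h => by simp at h
  | k :: t, a, 0, h => by simp [colList]
  | k :: t, a, i + 1, h => by
    simp only [colList, List.getD, List.take_succ_cons, List.foldl_cons]
    rw [← colList_getD logs t _ i (by simpa using h)]
    rfl

theorem b_assemble (dv : Option Int) (L : List (String × PySem.Dict String Int)) :
    ∀ (t pre : List String),
      (PySem.List.enumerate t (pre.length : Int)).map
        (fun ik => (ik.2, L.map (fun p => (p.1, PySem.List.pyGetD (colList p.2 dv (pre ++ t)) ik.1 none))))
      = snaps dv L pre t
  | [], pre => by simp [PySem.List.enumerate, snaps]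
  | k :: t, pre => by
    rw [PySem.List.enumerate_cons, List.map_cons]
    show _ :: _ = (k, snap dv L (pre ++ [k])) :: snaps dv L (pre ++ [k]) t
    congr 1
    · -- head entry
      simp only [PySem.List.pyGetD_natCast]
      congr 1
      apply List.map_congr_left
      intro p hp
      congr 1
      rw [colList_getD p.2 (pre ++ k :: t) dv pre.length (by simp)]
      rw [List.take_append]
      rw [List.take_of_length_le (by omega)]
      simp [ffill]
    · have hsplit : pre ++ k :: t = (pre ++ [k]) ++ t := by simp
      have hlen : (pre.length : Int) + 1 = (((pre ++ [k]).length : Nat) : Int) := by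
        simp
      rw [hsplit, hlen]
      exact b_assemble dv L t (pre ++ [k])


theorem merge_logs_ports_eq (logs_dict : List (String × List (String × Int))) (dv : Option Int) :
    merge_logs logs_dict dv = merge_logs_alt logs_dict dv := by
  unfold merge_logs merge_logs_alt
  dsimp only
  set ld := PySem.Dict.ofList (logs_dict.map (fun p => (p.1, PySem.Dict.ofList p.2))) with hld
  have hN : (ld.items.map Prod.fst).Nodup := by
    have := PySem.Dict.nodup_keys_ofList (logs_dict.map (fun p => (p.1, PySem.Dict.ofList p.2)))
    simpa [PySem.Dict.keys, hld] using this
  rw [foldl_set_update_flatMap (fun logs => PySem.Dict.keys logs) ld.values PySem.Set.empty]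
  rw [PySem.Set.update_empty]
  set keys := PySem.List.sorted
    (PySem.Set.ofList (ld.values.flatMap (fun logs => logs.keys))) (fun x => x) false with hkeys
  have hKnd : keys.Nodup :=
    ((PySem.List.sorted_perm _ _ _).symm).nodup (PySem.Set.nodup_ofList _)
  have hv0 : (ld.keys.foldl (fun d name => d.insert name dv) PySem.Dict.empty).items
      = snap dv ld.items [] := by
    rw [PySem.Dict.items_foldl_insert_fresh ld.keys (fun n => n) (fun _ => dv) PySem.Dict.empty
      (by intro a _; simp) (by simpa using PySem.Dict.nodup_keys_ofList _)]
    simp only [snap, ffill, PySem.Dict.keys, List.map_map]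
    rfl
  rw [outer_fold dv ld.items hN keys [] PySem.Dict.empty _ hv0 hKnd (by intro k _; simp)]
  set F := List.foldl (fun (f : PySem.Dict String (List (Option Int))) p =>
      f.insert p.1 (List.foldl (fun (st : Option Int × List (Option Int)) key =>
          (pyLogGet p.2 key st.1, st.2 ++ [pyLogGet p.2 key st.1])) (dv, []) keys).2)
    PySem.Dict.empty ld.items with hF
  have hfilled : F.items = ld.items.map (fun p => (p.1, colList p.2 dv keys)) := by
    rw [hF, PySem.Dict.items_foldl_insert_fresh ld.items Prod.fst
        (fun p => (List.foldl (fun (st : Option Int × List (Option Int)) key =>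
            (pyLogGet p.2 key st.1, st.2 ++ [pyLogGet p.2 key st.1])) (dv, []) keys).2)
        PySem.Dict.empty (by intro a _; simp) hN]
    simp only [scan_eq]
    rfl
  have hfk : F.keys.Nodup := by
    have : F.keys = ld.items.map (fun p => p.1) := by
      simp only [PySem.Dict.keys, hfilled]; simp [List.map_map]
    rw [this]; simpa using hN
  have hinner : ∀ i : Int,
      (List.foldl (fun s p => s.insert p.1 (PySem.List.pyGetD (F.getD p.1 []) i none))
          PySem.Dict.empty ld.items).items
        = ld.items.map (fun p => (p.1, PySem.List.pyGetD (colList p.2 dv keys) i none)) := by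
    intro i
    rw [PySem.Dict.items_foldl_insert_fresh ld.items Prod.fst
        (fun p => PySem.List.pyGetD (F.getD p.1 []) i none) PySem.Dict.empty
        (by intro a _; simp) hN]
    have := List.map_congr_left (l := ld.items)
      (f := fun a => (a.1, PySem.List.pyGetD (F.getD a.1 []) i none))
      (g := fun p => (p.1, PySem.List.pyGetD (colList p.2 dv keys) i none))
      (fun p hp => by
        show (p.1, PySem.List.pyGetD (F.getD p.1 []) i none)
          = (p.1, PySem.List.pyGetD (colList p.2 dv keys) i none)
        rw [PySem.Dict.getD_of_mem_items F
          (by rw [hfilled]; exact List.mem_map_of_mem hp) hfk])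
    exact this
  rw [PySem.Dict.items_foldl_insert_fresh (PySem.List.enumerate keys) Prod.snd
      (fun ik => (List.foldl (fun s p =>
          s.insert p.1 (PySem.List.pyGetD (F.getD p.1 []) ik.1 none))
        PySem.Dict.empty ld.items).items)
      PySem.Dict.empty (by intro a _; simp)
      (by rw [PySem.List.map_snd_enumerate]; exact hKnd)]
  simp only [hinner]
  have hasm := b_assemble dv ld.items keys []
  simp only [List.nil_append, List.length_nil, Nat.cast_zero] at hasm
  rw [hasm]
-- ===== VERDICT (by name: the statement is the Claim_ definition above) =====
theorem merge_logs_spec : Claim_equal_merge_logs := by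
  intro logs_dict default_value _
  exact merge_logs_ports_eq logs_dict default_value
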